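-- pv_equiv track=rewrite | github.com/fredpottier/KBGPT | poc/extractors/information_extractor.py | _find_sentence_bounds
-- ===== SOURCE A (Python) =====
-- from typing import Dict, List, Optional, Tuple
--
-- def _find_sentence_bounds(
--
--     text: str,
--     match_start: int,
--     match_end: int
-- ) -> Tuple[int, int]:
--     """Trouve les bornes de la phrase contenant le match"""
--     # Chercher le debut de phrase
--     start = match_start
--     while start > 0 and text[start - 1] not in '.!?\n':
--         start -= 1
--
--     # Chercher la fin de phrase
--     end = match_end
--     while end < len(text) and text[end] not in '.!?\n':
--         end += 1
--
--     # Inclure le point final si present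
--     if end < len(text) and text[end] in '.!?':
--         end += 1
--
--     return start, end
-- ===== SOURCE B (Python) =====
-- def _find_sentence_bounds(text, match_start, match_end):
--     """Sentence bounds via whole-string delimiter searches."""
--     start = match_start
--     if start > 0:
--         start = 1 + max(text.rfind(d, 0, start) for d in '.!?\n')
--     tail = text[match_end:]
--     off = min((p for p in (tail.find(d) for d in '.!?\n') if p != -1),
--               default=len(tail))
--     end = match_end + off
--     if end < len(text) and text[end] in '.!?':
--         end += 1
--     return start, end
-- ===== Notes on version B (the rewrite author's own statement) =====
-- stated objective: faster
-- what changed: Replaces the two char-by-char while loops with whole-string searches: start = 1 + max of rfind over the delimiter set on the prefix, end = match_end plus the offset of the first delimiter in the suffix text[match_end:] (defaulting to the suffix length), keeping the final '.!?' inclusion step; Pre_ excludes match_start > len(text), where A raises IndexError, and negative match_end, where A's end scan walks Python's wrapped negative indices.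
-- outside the precondition, e.g. on _find_sentence_bounds('x', 1, -1): A returns (0, 1), B returns (0, 0)
import Mathlib
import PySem

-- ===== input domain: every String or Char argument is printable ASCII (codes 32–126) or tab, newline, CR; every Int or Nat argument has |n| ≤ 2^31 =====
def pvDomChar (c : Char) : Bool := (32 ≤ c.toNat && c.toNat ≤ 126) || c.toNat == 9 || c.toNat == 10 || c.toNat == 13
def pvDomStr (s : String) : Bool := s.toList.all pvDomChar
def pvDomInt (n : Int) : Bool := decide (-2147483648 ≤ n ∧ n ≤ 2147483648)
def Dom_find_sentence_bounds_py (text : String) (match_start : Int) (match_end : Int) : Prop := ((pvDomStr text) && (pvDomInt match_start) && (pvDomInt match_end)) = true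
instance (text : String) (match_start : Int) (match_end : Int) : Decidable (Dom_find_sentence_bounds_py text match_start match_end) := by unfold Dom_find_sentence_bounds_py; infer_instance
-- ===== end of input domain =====

-- B replaces A's two char-by-char while loops with whole-string delimiter searches
-- (max of rfind on the prefix / min of the successful find results); same asymptotic
-- cost, different mechanism. Return values only.

-- ===== PORT A =====
-- membership tests `c in '.!?\n'` and `c in '.!?'`
def pvIsDelim (c : Char) : Bool := c == '.' || c == '!' || c == '?' || c == '\n'
def pvIsFinal (c : Char) : Bool := c == '.' || c == '!' || c == '?'

-- while start > 0 and text[start - 1] not in '.!?\n': start -= 1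
def pvAStart (cs : List Char) : Nat → Nat
  | 0 => 0
  | s + 1 => if pvIsDelim (cs.getD s ' ') then s + 1 else pvAStart cs s

-- while end < len(text) and text[end] not in '.!?\n': end += 1
def pvAEnd (cs : List Char) (e : Nat) : Nat :=
  if h : e < cs.length then
    if pvIsDelim cs[e] then e else pvAEnd cs (e + 1)
  else e
termination_by cs.length - e

def find_sentence_bounds_py (text : String) (match_start : Int) (match_end : Int) : Int × Int :=
  let cs := text.toList
  let start : Int := if match_start ≤ 0 then match_start else (pvAStart cs match_start.toNat : Int)
  let e0 : Int := if match_end < (cs.length : Int) then (pvAEnd cs match_end.toNat : Int) else match_end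
  -- if end < len(text) and text[end] in '.!?': end += 1
  let e1 : Int := if e0 < (cs.length : Int) ∧ pvIsFinal (cs.getD e0.toNat ' ') = true then e0 + 1 else e0
  (start, e1)

-- ===== PORT B =====
def pvDelims : List Char := ['.', '!', '?', '\n']

-- hand port of str.rfind for a single-character needle (PySem has no rfind); exact there
def pvRfind1 (cs : List Char) (c : Char) : Int :=
  match cs.reverse.findIdx? (· == c) with
  | some i => (cs.length : Int) - 1 - (i : Int)
  | none => -1

def find_sentence_bounds_py_alt (text : String) (match_start : Int) (match_end : Int) : Int × Int :=
  let cs := text.toList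
  -- if start > 0: start = 1 + max(text.rfind(d, 0, start) for d in '.!?\n')
  let start : Int :=
    if 0 < match_start then
      1 + (pvDelims.map (fun d => pvRfind1 (PySem.List.slice cs none (some match_start)) d)).foldl max (-1)
    else match_start
  -- tail = text[match_end:]
  let tail := PySem.List.slice cs (some match_end) none
  -- off = min((p for p in (tail.find(d) for d in '.!?\n') if p != -1), default=len(tail))
  let off : Int :=
    match ((pvDelims.map (fun d => PySem.Chars.find tail [d])).filter (fun p => p != -1)).min? with
    | some m => m | none => (tail.length : Int)
  -- end = match_end + off
  let e0 : Int := match_end + off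
  -- if end < len(text) and text[end] in '.!?': end += 1
  let e1 : Int := if e0 < (cs.length : Int) ∧ pvIsFinal (cs.getD e0.toNat ' ') = true then e0 + 1 else e0
  (start, e1)

-- ===== PRECONDITION & SPEC =====
-- Pre_ excludes match_start > len(text), where A raises IndexError, and negative match_end,
-- where A's end scan walks Python negative (wrapped) indices and can return a negative end --
-- a wraparound artefact no caller of a match-span helper would specify.
def Pre_find_sentence_bounds_py (text : String) (match_start : Int) (match_end : Int) : Prop :=
  match_start ≤ (text.toList.length : Int) ∧ 0 ≤ match_end
instance (text : String) (match_start : Int) (match_end : Int) : Decidable (Pre_find_sentence_bounds_py text match_start match_end) := by unfold Pre_find_sentence_bounds_py; infer_instance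

def pvWitness_find_sentence_bounds_py : String × Int × Int := ("ab. cd ef", 5, 6)

def Spec_find_sentence_bounds_py (text : String) (match_start : Int) (match_end : Int) (out : Int × Int) : Prop := out = find_sentence_bounds_py_alt text match_start match_end
instance (text : String) (match_start : Int) (match_end : Int) (out : Int × Int) : Decidable (Spec_find_sentence_bounds_py text match_start match_end out) := by unfold Spec_find_sentence_bounds_py; infer_instance

-- ===== CLAIM (what is proved, stated in full; the proofs are below) =====
def Claim_equal_find_sentence_bounds_py : Prop := ∀ (text : String) (match_start : Int) (match_end : Int), Dom_find_sentence_bounds_py text match_start match_end → Pre_find_sentence_bounds_py text match_start match_end → Spec_find_sentence_bounds_py text match_start match_end (find_sentence_bounds_py text match_start match_end)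

-- ===== LEMMAS AND PROOFS =====

-- characterization of the B-side find: first index ≥ e of d, else -1
def pvF (cs : List Char) (d : Char) (e : Nat) : Int :=
  match (cs.drop e).findIdx? (· == d) with
  | some i => ((e + i : Nat) : Int)
  | none => -1

lemma pvRfind1_append (xs : List Char) (c d : Char) :
    pvRfind1 (xs ++ [c]) d = if c == d then (xs.length : Int) else pvRfind1 xs d := by
  unfold pvRfind1
  rw [List.reverse_append]
  simp only [List.reverse_singleton, List.singleton_append, List.findIdx?_cons]
  by_cases h : c = d
  · simp [h]
  · simp only [beq_eq_false_iff_ne, if_neg, h, beq_iff_eq]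
    cases hf : xs.reverse.findIdx? (· == d) with
    | none => simp [h]
    | some i => simp [h]; push_cast; ring

lemma pvRfind1_bounds (xs : List Char) (d : Char) :
    -1 ≤ pvRfind1 xs d ∧ pvRfind1 xs d < (xs.length : Int) := by
  unfold pvRfind1
  cases hf : xs.reverse.findIdx? (· == d) with
  | none => simp; omega
  | some i =>
    have hi : i < xs.length := by
      have := List.findIdx?_eq_some_iff_findIdx_eq.mp hf
      simpa using this.1
    simp; omega

lemma pvStart_eq (cs : List Char) : ∀ s : Nat, s ≤ cs.length →
    1 + (pvDelims.map (fun d => pvRfind1 (cs.take s) d)).foldl max (-1) = (pvAStart cs s : Int) := by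
  intro s
  induction s with
  | zero => intro _; simp [pvDelims, pvAStart, pvRfind1]
  | succ s ih =>
    intro hs
    have hlt : s < cs.length := by omega
    have hc : cs.take (s+1) = cs.take s ++ [cs[s]] := by
      rw [List.take_succ]; simp [List.getElem?_eq_getElem hlt]
    have hlen : (cs.take s).length = s := by simp; omega
    have hA : pvAStart cs (s+1) = if pvIsDelim cs[s] then s + 1 else pvAStart cs s := by
      simp only [pvAStart, List.getD_eq_getElem?_getD, List.getElem?_eq_getElem hlt,
        Option.getD_some]
    rw [hc]
    simp only [pvDelims, List.map_cons, List.map_nil, pvRfind1_append, hlen]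
    obtain ⟨hb1, hl1⟩ := pvRfind1_bounds (cs.take s) '.'
    obtain ⟨hb2, hl2⟩ := pvRfind1_bounds (cs.take s) '!'
    obtain ⟨hb3, hl3⟩ := pvRfind1_bounds (cs.take s) '?'
    obtain ⟨hb4, hl4⟩ := pvRfind1_bounds (cs.take s) '\n'
    rw [hlen] at hl1 hl2 hl3 hl4
    by_cases hd : pvIsDelim cs[s] = true
    · rw [hA, if_pos hd]
      have : cs[s] = '.' ∨ cs[s] = '!' ∨ cs[s] = '?' ∨ cs[s] = '\n' := by
        simp [pvIsDelim] at hd; tauto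
      rcases this with h|h|h|h <;>
        · rw [h]
          simp only [List.foldl]
          norm_num
          omega
    · rw [hA, if_neg hd]
      have h1 : ¬ cs[s] = '.' ∧ ¬ cs[s] = '!' ∧ ¬ cs[s] = '?' ∧ ¬ cs[s] = '\n' := by
        simp [pvIsDelim] at hd; tauto
      obtain ⟨h1, h2, h3, h4⟩ := h1
      rw [if_neg (by simp [h1]), if_neg (by simp [h2]), if_neg (by simp [h3]), if_neg (by simp [h4])]
      have := ih (by omega)
      simpa [pvDelims] using this

lemma go_eq (d : Char) : ∀ (t : List Char) (k : Nat),
    PySem.Chars.find.go [d] t k =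
      (match t.findIdx? (· == d) with
       | some i => ((k + i : Nat) : Int)
       | none => -1) := by
  intro t
  induction t with
  | nil => intro k; simp [PySem.Chars.find.go]
  | cons h t ih =>
    intro k
    rw [PySem.Chars.find.go]
    by_cases hd : h = d
    · simp [hd, List.findIdx?_cons, List.isPrefixOf]
    · have hp : [d].isPrefixOf (h :: t) = false := by
        simp [List.isPrefixOf]; exact fun he => absurd he.symm hd
      rw [hp]
      simp only [List.findIdx?_cons, beq_iff_eq, hd, if_false, ih]
      cases hf : t.findIdx? (· == d) with
      | none => simp
      | some i => simp; push_cast; ring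

lemma pvF_cons (cs : List Char) (d : Char) (e : Nat) (he : e < cs.length) :
    pvF cs d e = if cs[e] == d then (e : Int) else pvF cs d (e + 1) := by
  unfold pvF
  rw [List.drop_eq_getElem_cons he, List.findIdx?_cons]
  by_cases hd : cs[e] = d
  · simp [hd]
  · simp only [beq_iff_eq, hd, if_false]
    cases hf : (cs.drop (e+1)).findIdx? (· == d) with
    | none => simp
    | some i => simp; push_cast; ring

lemma pvF_bounds (cs : List Char) (d : Char) (e : Nat) :
    pvF cs d e = -1 ∨ (e : Int) ≤ pvF cs d e := by
  unfold pvF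
  cases hf : (cs.drop e).findIdx? (· == d) with
  | none => left; rfl
  | some i => right; push_cast; omega

lemma pvMin4 (L : Int) (v1 v2 v3 v4 e : Int) (he : 0 ≤ e)
    (hmem : v1 = e ∨ v2 = e ∨ v3 = e ∨ v4 = e)
    (h1 : v1 = -1 ∨ e ≤ v1) (h2 : v2 = -1 ∨ e ≤ v2)
    (h3 : v3 = -1 ∨ e ≤ v3) (h4 : v4 = -1 ∨ e ≤ v4) :
    (match (([v1, v2, v3, v4] : List Int).filter (fun p => p != -1)).min? with
     | some m => m | none => L) = e := by
  have hmin : (([v1, v2, v3, v4] : List Int).filter (fun p => p != -1)).min? = some e := by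
    rw [List.min?_eq_some_iff]
    constructor
    · rw [List.mem_filter]
      constructor
      · rcases hmem with h|h|h|h <;> simp [h]
      · simp; omega
    · intro b hb
      rw [List.mem_filter] at hb
      obtain ⟨hbm, hbne⟩ := hb
      simp at hbm hbne
      rcases hbm with h|h|h|h <;> subst h <;> omega
  rw [hmin]

lemma pvEnd_eq (cs : List Char) : ∀ (k e : Nat), cs.length - e = k → e ≤ cs.length →
    (match ((pvDelims.map (fun d => pvF cs d e)).filter (fun p => p != -1)).min? with
     | some m => m | none => (cs.length : Int)) = (pvAEnd cs e : Int) := by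
  intro k
  induction k with
  | zero =>
    intro e hk he
    have hee : e = cs.length := by omega
    subst hee
    rw [pvAEnd]
    simp [pvDelims, pvF, List.drop_length]
  | succ k ih =>
    intro e hk he
    have hlt : e < cs.length := by omega
    rw [pvAEnd, dif_pos hlt]
    by_cases hd : pvIsDelim cs[e] = true
    · rw [if_pos hd]
      have hor : cs[e] = '.' ∨ cs[e] = '!' ∨ cs[e] = '?' ∨ cs[e] = '\n' := by
        simp [pvIsDelim] at hd; tauto
      simp only [pvDelims, List.map_cons, List.map_nil]
      apply pvMin4 _ _ _ _ _ _ (by omega)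
      · rcases hor with h|h|h|h
        · left; rw [pvF_cons cs _ e hlt, h]; simp
        · right; left; rw [pvF_cons cs _ e hlt, h]; simp
        · right; right; left; rw [pvF_cons cs _ e hlt, h]; simp
        · right; right; right; rw [pvF_cons cs _ e hlt, h]; simp
      all_goals exact pvF_bounds cs _ e
    · rw [if_neg hd]
      have h1 : ¬ cs[e] = '.' ∧ ¬ cs[e] = '!' ∧ ¬ cs[e] = '?' ∧ ¬ cs[e] = '\n' := by
        simp [pvIsDelim] at hd; tauto
      obtain ⟨h1, h2, h3, h4⟩ := h1
      have step : ∀ d : Char, ¬ cs[e] = d → pvF cs d e = pvF cs d (e + 1) := by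
        intro d hne
        rw [pvF_cons cs d e hlt, if_neg (by simpa using hne)]
      simp only [pvDelims, List.map_cons, List.map_nil, step _ h1, step _ h2, step _ h3, step _ h4]
      have := ih (e + 1) (by omega) (by omega)
      simpa [pvDelims] using this

-- B-side find on the tail: first index of d, else -1
def pvG (t : List Char) (d : Char) : Int :=
  match t.findIdx? (· == d) with
  | some i => (i : Int)
  | none => -1

lemma find_char (t : List Char) (d : Char) : PySem.Chars.find t [d] = pvG t d := by
  rw [PySem.Chars.find, go_eq]
  unfold pvG
  cases hf : t.findIdx? (· == d) with
  | none => simp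
  | some i => simp

lemma pvG_bounds (t : List Char) (d : Char) : pvG t d = -1 ∨ 0 ≤ pvG t d := by
  unfold pvG
  cases hf : t.findIdx? (· == d) with
  | none => left; rfl
  | some i => right; exact Int.natCast_nonneg i

lemma pvF_eq (cs : List Char) (d : Char) (e : Nat) :
    pvF cs d e = if pvG (cs.drop e) d = -1 then -1 else (e : Int) + pvG (cs.drop e) d := by
  unfold pvF pvG
  cases hf : (cs.drop e).findIdx? (· == d) with
  | none => simp
  | some i =>
    simp only []
    rw [if_neg (by omega)]
    push_cast
    ring

lemma pvFilterMap (e : Int) (he : 0 ≤ e) : ∀ l : List Int, (∀ x ∈ l, x = -1 ∨ 0 ≤ x) →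
    (l.map (fun g => if g = -1 then -1 else e + g)).filter (fun p => p != -1)
      = (l.filter (fun p => p != -1)).map (fun g => e + g) := by
  intro l
  induction l with
  | nil => intro _; simp
  | cons x l ih =>
    intro hx
    have hrest : ∀ y ∈ l, y = -1 ∨ 0 ≤ y := fun y hy => hx y (List.mem_cons_of_mem _ hy)
    rcases hx x List.mem_cons_self with rfl | hx0
    · simpa using ih hrest
    · have h1 : ¬ x = -1 := by omega
      have h2 : (x != -1) = true := by simpa using h1
      have h3 : ((e + x) != -1) = true := by simp; omega
      simp only [List.map_cons, List.filter_cons, if_neg h1, h2, h3, if_true, List.map_cons]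
      rw [ih hrest]

lemma pvMinMap (e : Int) (l : List Int) :
    (l.map (fun g => e + g)).min? = l.min?.map (fun g => e + g) := by
  cases l with
  | nil => simp
  | cons x l =>
    simp only [List.map_cons]
    rw [List.min?_cons, List.min?_cons]
    cases h : l.min? with
    | none =>
      have hm : (l.map (fun g => e + g)).min? = none := by
        simp only [List.min?_eq_none_iff] at h ⊢
        simp [h]
      simp [hm]
    | some m =>
      have hm : (l.map (fun g => e + g)).min? = some (e + m) := by
        rw [pvMinMap e l, h]; rfl
      rw [hm]
      simp [Option.elim, min_add_add_left]

lemma pvEndNew (cs : List Char) (e : Nat) (he : e ≤ cs.length) :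
    (e : Int) + (match ((pvDelims.map (fun d => PySem.Chars.find (cs.drop e) [d])).filter (fun p => p != -1)).min? with
      | some m => m | none => ((cs.drop e).length : Int)) = (pvAEnd cs e : Int) := by
  have hmap1 : pvDelims.map (fun d => PySem.Chars.find (cs.drop e) [d])
      = pvDelims.map (fun d => pvG (cs.drop e) d) :=
    List.map_congr_left (fun d _ => find_char (cs.drop e) d)
  have hmap2 : pvDelims.map (fun d => pvF cs d e)
      = (pvDelims.map (fun d => pvG (cs.drop e) d)).map (fun g => if g = -1 then -1 else (e : Int) + g) := by
    rw [List.map_map]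
    exact List.map_congr_left (fun d _ => pvF_eq cs d e)
  have hall : ∀ x ∈ pvDelims.map (fun d => pvG (cs.drop e) d), x = -1 ∨ 0 ≤ x := by
    intro x hx
    obtain ⟨d, _, rfl⟩ := List.mem_map.mp hx
    exact pvG_bounds (cs.drop e) d
  have hold := pvEnd_eq cs (cs.length - e) e rfl he
  rw [hmap2, pvFilterMap (e : Int) (by omega) _ hall, pvMinMap] at hold
  rw [hmap1]
  rw [← hold]
  cases hm : ((pvDelims.map (fun d => pvG (cs.drop e) d)).filter (fun p => p != -1)).min? with
  | none =>
    simp only [Option.map_none]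
    rw [List.length_drop]
    push_cast [Nat.cast_sub he]
    ring
  | some m => simp

-- ===== VERDICT (by name: the statement is the Claim_ definition above) =====
theorem find_sentence_bounds_py_spec : Claim_equal_find_sentence_bounds_py := by
  intro text ms me _ hpre
  obtain ⟨hmsl, hme0⟩ := hpre
  unfold Spec_find_sentence_bounds_py
  simp only [find_sentence_bounds_py, find_sentence_bounds_py_alt]
  lift me to ℕ using hme0 with e
  set cs := text.toList with hcs
  have hS : (if ms ≤ 0 then ms else (pvAStart cs ms.toNat : Int)) =
      (if 0 < ms then
        1 + (pvDelims.map (fun d => pvRfind1 (PySem.List.slice cs none (some ms)) d)).foldl max (-1)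
       else ms) := by
    by_cases h0 : ms ≤ 0
    · rw [if_pos h0, if_neg (by omega)]
    · rw [if_neg h0, if_pos (by omega)]
      lift ms to ℕ using (by omega : (0:Int) ≤ ms) with s
      rw [PySem.List.slice_to_natCast, Int.toNat_natCast]
      exact (pvStart_eq cs s (by exact_mod_cast hmsl)).symm
  rw [hS]
  have htail : PySem.List.slice cs (some ((e : Nat) : Int)) none = cs.drop e :=
    PySem.List.slice_from_natCast cs e
  rw [htail]
  by_cases hel : e ≤ cs.length
  · have hE : (if (e : Int) < (cs.length : Int) then (pvAEnd cs ((e : Int)).toNat : Int) else (e : Int)) =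
        (e : Int) + (match ((pvDelims.map (fun d => PySem.Chars.find (cs.drop e) [d])).filter (fun p => p != -1)).min? with
          | some m => m | none => ((cs.drop e).length : Int)) := by
      have hA : (if (e : Int) < (cs.length : Int) then (pvAEnd cs ((e : Int)).toNat : Int) else (e : Int)) = (pvAEnd cs e : Int) := by
        by_cases h : e < cs.length
        · rw [if_pos (by exact_mod_cast h), Int.toNat_natCast]
        · have hee : e = cs.length := by omega
          rw [if_neg (by omega), hee, pvAEnd]
          simp
      rw [hA, pvEndNew cs e hel]
    rw [hE]
  · -- match_end past the end of the text: the tail is empty, both sides return match_end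
    have hdrop : cs.drop e = ([] : List Char) := List.drop_eq_nil_of_le (by omega)
    have hfind : ∀ d : Char, PySem.Chars.find (([]) : List Char) [d] = -1 := by
      intro d
      rw [find_char]
      rfl
    rw [hdrop]
    simp only [pvDelims, List.map_cons, List.map_nil, hfind]
    norm_num [List.filter, List.min?]
    have h1 : ¬ e < cs.length := by omega
    have h2 : ¬ ((e : Int) < (cs.length : Int)) := by omega
    simp [h1, h2]
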